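-- pv_equiv track=rewrite | github.com/gowdakiran17/astro360-2 | astro_app/backend/astrology/ashtakvarga.py | calculate_prastaraka
-- ===== SOURCE A (Python) =====
-- from typing import List, Dict
--
-- ASHTAKVARGA_TABLES = {
--     "Sun": {
--         "Sun": [1, 2, 4, 7, 8, 9, 10, 11],
--         "Moon": [3, 6, 10, 11],
--         "Mars": [1, 2, 4, 7, 8, 9, 10, 11],
--         "Mercury": [3, 5, 6, 9, 10, 11, 12],
--         "Jupiter": [5, 6, 9, 11],
--         "Venus": [6, 7, 12],
--         "Saturn": [1, 2, 4, 7, 8, 9, 10, 11],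
--         "Lagna": [3, 4, 6, 10, 11, 12]
--     },
--     "Moon": {
--         "Sun": [3, 6, 7, 8, 10, 11],
--         "Moon": [1, 3, 6, 7, 10, 11],
--         "Mars": [2, 3, 5, 6, 9, 10, 11],
--         "Mercury": [1, 3, 4, 5, 7, 8, 10, 11],
--         "Jupiter": [1, 4, 7, 8, 10, 11, 12],
--         "Venus": [3, 4, 5, 7, 9, 10, 11],
--         "Saturn": [3, 5, 6, 11],
--         "Lagna": [3, 6, 10, 11]
--     },
--     "Mars": {
--         "Sun": [3, 5, 6, 10, 11],
--         "Moon": [3, 6, 11],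
--         "Mars": [1, 2, 4, 7, 8, 10, 11],
--         "Mercury": [3, 5, 6, 11],
--         "Jupiter": [6, 10, 11, 12],
--         "Venus": [6, 8, 11, 12],
--         "Saturn": [1, 4, 7, 8, 9, 10, 11],
--         "Lagna": [1, 3, 6, 10, 11]
--     },
--     "Mercury": {
--         "Sun": [5, 6, 9, 11, 12],
--         "Moon": [2, 4, 6, 8, 10, 11],
--         "Mars": [1, 2, 4, 7, 8, 9, 10, 11],
--         "Mercury": [1, 3, 5, 6, 9, 10, 11, 12],
--         "Jupiter": [6, 8, 11, 12],
--         "Venus": [1, 2, 3, 4, 5, 8, 9, 11],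
--         "Saturn": [1, 2, 4, 7, 8, 9, 10, 11],
--         "Lagna": [1, 2, 4, 6, 8, 10, 11]
--     },
--     "Jupiter": {
--         "Sun": [1, 2, 3, 4, 7, 8, 9, 10, 11],
--         "Moon": [2, 5, 7, 9, 11],
--         "Mars": [1, 2, 4, 7, 8, 10, 11],
--         "Mercury": [1, 2, 4, 5, 6, 9, 10, 11],
--         "Jupiter": [1, 2, 3, 4, 7, 8, 10, 11],
--         "Venus": [2, 5, 6, 9, 10, 11],
--         "Saturn": [3, 5, 6, 12],
--         "Lagna": [1, 2, 4, 5, 6, 7, 9, 10, 11]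
--     },
--     "Venus": {
--         "Sun": [8, 11, 12],
--         "Moon": [1, 2, 3, 4, 5, 8, 9, 11, 12],
--         "Mars": [3, 5, 6, 9, 11, 12],
--         "Mercury": [3, 5, 6, 9, 11],
--         "Jupiter": [5, 8, 9, 10, 11],
--         "Venus": [1, 2, 3, 4, 5, 8, 9, 10, 11],
--         "Saturn": [3, 4, 5, 8, 9, 10, 11],
--         "Lagna": [1, 2, 3, 4, 5, 8, 9, 11]
--     },
--     "Saturn": {
--         "Sun": [1, 2, 4, 7, 8, 10, 11],
--         "Moon": [3, 6, 11],
--         "Mars": [3, 5, 6, 10, 11, 12],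
--         "Mercury": [6, 8, 9, 10, 11, 12],
--         "Jupiter": [5, 6, 11, 12],
--         "Venus": [6, 11, 12],
--         "Saturn": [3, 5, 6, 11],
--         "Lagna": [1, 3, 4, 6, 10, 11]
--     }
-- }
--
-- def calculate_prastaraka(planet_positions: Dict[str, int], target_planet: str) -> Dict[str, List[int]]:
--     """
--     Calculates Prastaraka (Detailed Breakdown) for a specific planet.
--     Returns a dictionary mapping Donor Planet -> List of 12 (1/0) indicating contribution per sign.
--     """
--     prastaraka = {}
--     rules = ASHTAKVARGA_TABLES.get(target_planet)
--     if not rules: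
--         return prastaraka
--
--     # Initialize for all standard donors (7 planets + Lagna)
--     donors = ["Sun", "Moon", "Mars", "Mercury", "Jupiter", "Venus", "Saturn", "Lagna"]
--     for d in donors:
--         prastaraka[d] = [0] * 12
--
--     for source_p, houses in rules.items():
--         if source_p in planet_positions:
--             source_pos = planet_positions[source_p]
--             row = prastaraka.get(source_p, [0]*12) # Should exist
--             for h in houses:
--                 target_sign = (source_pos + (h - 1)) % 12
--                 row[target_sign] = 1
--             prastaraka[source_p] = row
--
--     return prastaraka
-- ===== SOURCE B (Python) =====
-- from typing import List, Dict
--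
-- # Precomputed 12-bit house masks: bit (h-1) of PRASTARAKA_MASKS[target][donor] is set
-- # iff house h appears in ASHTAKVARGA_TABLES[target][donor].
-- PRASTARAKA_MASKS = {
--     "Sun":     {"Sun": 1995, "Moon": 1572, "Mars": 1995, "Mercury": 3892,
--                 "Jupiter": 1328, "Venus": 2144, "Saturn": 1995, "Lagna": 3628},
--     "Moon":    {"Sun": 1764, "Moon": 1637, "Mars": 1846, "Mercury": 1757,
--                 "Jupiter": 3785, "Venus": 1884, "Saturn": 1076, "Lagna": 1572},
--     "Mars":    {"Sun": 1588, "Moon": 1060, "Mars": 1739, "Mercury": 1076,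
--                 "Jupiter": 3616, "Venus": 3232, "Saturn": 1993, "Lagna": 1573},
--     "Mercury": {"Sun": 3376, "Moon": 1706, "Mars": 1995, "Mercury": 3893,
--                 "Jupiter": 3232, "Venus": 1439, "Saturn": 1995, "Lagna": 1707},
--     "Jupiter": {"Sun": 1999, "Moon": 1362, "Mars": 1739, "Mercury": 1851,
--                 "Jupiter": 1743, "Venus": 1842, "Saturn": 2100, "Lagna": 1915},
--     "Venus":   {"Sun": 3200, "Moon": 3487, "Mars": 3380, "Mercury": 1332,
--                 "Jupiter": 1936, "Venus": 1951, "Saturn": 1948, "Lagna": 1439},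
--     "Saturn":  {"Sun": 1739, "Moon": 1060, "Mars": 3636, "Mercury": 4000,
--                 "Jupiter": 3120, "Venus": 3104, "Saturn": 1076, "Lagna": 1581},
-- }
--
-- DONORS = ["Sun", "Moon", "Mars", "Mercury", "Jupiter", "Venus", "Saturn", "Lagna"]
--
--
-- def calculate_prastaraka(planet_positions: Dict[str, int], target_planet: str) -> Dict[str, List[int]]:
--     masks = PRASTARAKA_MASKS.get(target_planet)
--     if masks is None:
--         return {}
--     out = {}
--     for d in DONORS:
--         if d in planet_positions:
--             pos = planet_positions[d]
--             m = masks[d]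
--             out[d] = [(m >> ((s - pos) % 12)) & 1 for s in range(12)]
--         else:
--             out[d] = [0] * 12
--     return out
-- ===== Notes on version B (the rewrite author's own statement) =====
-- stated objective: alternative
-- what changed: Replaces A's scatter (initialize all rows, then for each rule entry write 1s into house-derived indices of mutable rows held in a dict) by a precomputed 12-bit house-mask table: for each donor the row is gathered by iterating the 12 signs and extracting bit ((s - pos) % 12) of the donor's mask with shift-and-mask arithmetic; the houses lists disappear entirely.
import Mathlib
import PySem

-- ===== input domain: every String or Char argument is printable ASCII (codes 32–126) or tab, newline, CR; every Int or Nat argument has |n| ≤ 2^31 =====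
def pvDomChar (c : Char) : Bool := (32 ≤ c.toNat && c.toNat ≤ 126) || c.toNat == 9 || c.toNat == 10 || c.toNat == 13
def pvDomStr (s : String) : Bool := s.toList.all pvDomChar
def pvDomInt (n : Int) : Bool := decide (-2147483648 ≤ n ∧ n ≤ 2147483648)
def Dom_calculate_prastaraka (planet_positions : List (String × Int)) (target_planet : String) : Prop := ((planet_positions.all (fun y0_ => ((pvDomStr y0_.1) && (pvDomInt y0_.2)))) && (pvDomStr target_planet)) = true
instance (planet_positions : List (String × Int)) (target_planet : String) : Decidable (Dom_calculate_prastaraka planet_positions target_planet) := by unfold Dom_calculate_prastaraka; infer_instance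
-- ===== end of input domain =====

-- B replaces A's scatter of 1s into mutable rows by a precomputed 12-bit house-mask table and
-- gathers each row by bit extraction over the 12 signs (objective: alternative, same cost).

-- ===== PORT A =====
-- A's module-level constant ASHTAKVARGA_TABLES
def ASHTAKVARGA_TABLES : PySem.Dict String (PySem.Dict String (List Int)) :=
  PySem.Dict.mk [
    ("Sun", PySem.Dict.mk [
      ("Sun", [1, 2, 4, 7, 8, 9, 10, 11]), ("Moon", [3, 6, 10, 11]),
      ("Mars", [1, 2, 4, 7, 8, 9, 10, 11]), ("Mercury", [3, 5, 6, 9, 10, 11, 12]),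
      ("Jupiter", [5, 6, 9, 11]), ("Venus", [6, 7, 12]),
      ("Saturn", [1, 2, 4, 7, 8, 9, 10, 11]), ("Lagna", [3, 4, 6, 10, 11, 12])]),
    ("Moon", PySem.Dict.mk [
      ("Sun", [3, 6, 7, 8, 10, 11]), ("Moon", [1, 3, 6, 7, 10, 11]),
      ("Mars", [2, 3, 5, 6, 9, 10, 11]), ("Mercury", [1, 3, 4, 5, 7, 8, 10, 11]),
      ("Jupiter", [1, 4, 7, 8, 10, 11, 12]), ("Venus", [3, 4, 5, 7, 9, 10, 11]),
      ("Saturn", [3, 5, 6, 11]), ("Lagna", [3, 6, 10, 11])]),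
    ("Mars", PySem.Dict.mk [
      ("Sun", [3, 5, 6, 10, 11]), ("Moon", [3, 6, 11]),
      ("Mars", [1, 2, 4, 7, 8, 10, 11]), ("Mercury", [3, 5, 6, 11]),
      ("Jupiter", [6, 10, 11, 12]), ("Venus", [6, 8, 11, 12]),
      ("Saturn", [1, 4, 7, 8, 9, 10, 11]), ("Lagna", [1, 3, 6, 10, 11])]),
    ("Mercury", PySem.Dict.mk [
      ("Sun", [5, 6, 9, 11, 12]), ("Moon", [2, 4, 6, 8, 10, 11]),
      ("Mars", [1, 2, 4, 7, 8, 9, 10, 11]), ("Mercury", [1, 3, 5, 6, 9, 10, 11, 12]),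
      ("Jupiter", [6, 8, 11, 12]), ("Venus", [1, 2, 3, 4, 5, 8, 9, 11]),
      ("Saturn", [1, 2, 4, 7, 8, 9, 10, 11]), ("Lagna", [1, 2, 4, 6, 8, 10, 11])]),
    ("Jupiter", PySem.Dict.mk [
      ("Sun", [1, 2, 3, 4, 7, 8, 9, 10, 11]), ("Moon", [2, 5, 7, 9, 11]),
      ("Mars", [1, 2, 4, 7, 8, 10, 11]), ("Mercury", [1, 2, 4, 5, 6, 9, 10, 11]),
      ("Jupiter", [1, 2, 3, 4, 7, 8, 10, 11]), ("Venus", [2, 5, 6, 9, 10, 11]),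
      ("Saturn", [3, 5, 6, 12]), ("Lagna", [1, 2, 4, 5, 6, 7, 9, 10, 11])]),
    ("Venus", PySem.Dict.mk [
      ("Sun", [8, 11, 12]), ("Moon", [1, 2, 3, 4, 5, 8, 9, 11, 12]),
      ("Mars", [3, 5, 6, 9, 11, 12]), ("Mercury", [3, 5, 6, 9, 11]),
      ("Jupiter", [5, 8, 9, 10, 11]), ("Venus", [1, 2, 3, 4, 5, 8, 9, 10, 11]),
      ("Saturn", [3, 4, 5, 8, 9, 10, 11]), ("Lagna", [1, 2, 3, 4, 5, 8, 9, 11])]),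
    ("Saturn", PySem.Dict.mk [
      ("Sun", [1, 2, 4, 7, 8, 10, 11]), ("Moon", [3, 6, 11]),
      ("Mars", [3, 5, 6, 10, 11, 12]), ("Mercury", [6, 8, 9, 10, 11, 12]),
      ("Jupiter", [5, 6, 11, 12]), ("Venus", [6, 11, 12]),
      ("Saturn", [3, 5, 6, 11]), ("Lagna", [1, 3, 4, 6, 10, 11])])]

-- inner loop: for h in houses: row[(source_pos + (h - 1)) % 12] = 1
def aFill (source_pos : Int) (row0 : List Int) (houses : List Int) : List Int :=
  houses.foldl (fun row h => PySem.List.pySetD row (PySem.Int.mod (source_pos + (h - 1)) 12) 1) row0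

-- init loop: for d in donors: prastaraka[d] = [0]*12
def aInitDonors (donors : List String) : PySem.Dict String (List Int) :=
  donors.foldl (fun prast d => prast.insert d (List.replicate 12 0)) PySem.Dict.empty

-- body of the rules loop: if source_p in planet_positions: … ; prastaraka[source_p] = row
def aStep (planet_positions : List (String × Int)) (pr : PySem.Dict String (List Int))
    (e : String × List Int) : PySem.Dict String (List Int) :=
  match (PySem.Dict.mk planet_positions).get? e.1 with
  | some source_pos => pr.insert e.1 (aFill source_pos (pr.getD e.1 (List.replicate 12 0)) e.2)
  | none => pr

def calculate_prastaraka (planet_positions : List (String × Int)) (target_planet : String) :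
    List (String × List Int) :=
  match ASHTAKVARGA_TABLES.get? target_planet with
  | none => []                                 -- rules is None: "if not rules: return prastaraka"
  | some rules =>
    if rules.items = [] then [] else           -- empty-dict falsy case of "if not rules"
    let donors : List String := ["Sun", "Moon", "Mars", "Mercury", "Jupiter", "Venus", "Saturn", "Lagna"]
    (rules.items.foldl (aStep planet_positions) (aInitDonors donors)).items

-- ===== PORT B =====
-- Source B's module-level constant: bit (h-1) of PRASTARAKA_MASKS[target][donor] is set iff
-- house h appears in ASHTAKVARGA_TABLES[target][donor].
def PRASTARAKA_MASKS : PySem.Dict String (PySem.Dict String Int) :=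
  PySem.Dict.mk [
    ("Sun",     PySem.Dict.mk [("Sun", 1995), ("Moon", 1572), ("Mars", 1995), ("Mercury", 3892),
                               ("Jupiter", 1328), ("Venus", 2144), ("Saturn", 1995), ("Lagna", 3628)]),
    ("Moon",    PySem.Dict.mk [("Sun", 1764), ("Moon", 1637), ("Mars", 1846), ("Mercury", 1757),
                               ("Jupiter", 3785), ("Venus", 1884), ("Saturn", 1076), ("Lagna", 1572)]),
    ("Mars",    PySem.Dict.mk [("Sun", 1588), ("Moon", 1060), ("Mars", 1739), ("Mercury", 1076),
                               ("Jupiter", 3616), ("Venus", 3232), ("Saturn", 1993), ("Lagna", 1573)]),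
    ("Mercury", PySem.Dict.mk [("Sun", 3376), ("Moon", 1706), ("Mars", 1995), ("Mercury", 3893),
                               ("Jupiter", 3232), ("Venus", 1439), ("Saturn", 1995), ("Lagna", 1707)]),
    ("Jupiter", PySem.Dict.mk [("Sun", 1999), ("Moon", 1362), ("Mars", 1739), ("Mercury", 1851),
                               ("Jupiter", 1743), ("Venus", 1842), ("Saturn", 2100), ("Lagna", 1915)]),
    ("Venus",   PySem.Dict.mk [("Sun", 3200), ("Moon", 3487), ("Mars", 3380), ("Mercury", 1332),
                               ("Jupiter", 1936), ("Venus", 1951), ("Saturn", 1948), ("Lagna", 1439)]),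
    ("Saturn",  PySem.Dict.mk [("Sun", 1739), ("Moon", 1060), ("Mars", 3636), ("Mercury", 4000),
                               ("Jupiter", 3120), ("Venus", 3104), ("Saturn", 1076), ("Lagna", 1581)])]

def DONORS : List String := ["Sun", "Moon", "Mars", "Mercury", "Jupiter", "Venus", "Saturn", "Lagna"]

-- one iteration of Source B's donor loop: if d in planet_positions: gather the row from the mask
-- (Python's (m >> k) & 1 on a nonnegative m and 0 ≤ k < 12 is exactly floordiv by 2^k then mod 2;
-- masks[d] never raises since every mask dict holds all eight donors, so getD is exact here)
def bDonorRow (masks : PySem.Dict String Int) (planet_positions : List (String × Int))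
    (d : String) : List Int :=
  match (PySem.Dict.mk planet_positions).get? d with
  | none => List.replicate 12 0
  | some pos =>
    let m := masks.getD d 0
    (PySem.List.pyRange 0 12 1).map
      (fun s => PySem.Int.mod (PySem.Int.floordiv m (2 ^ (PySem.Int.mod (s - pos) 12).toNat)) 2)

def calculate_prastaraka_alt (planet_positions : List (String × Int)) (target_planet : String) :
    List (String × List Int) :=
  match PRASTARAKA_MASKS.get? target_planet with
  | none => []                                 -- "if masks is None: return {}"
  | some masks => DONORS.map (fun d => (d, bDonorRow masks planet_positions d))

-- ===== PRECONDITION & SPEC =====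
def Spec_calculate_prastaraka (planet_positions : List (String × Int)) (target_planet : String) (out : List (String × List Int)) : Prop := out = calculate_prastaraka_alt planet_positions target_planet
instance (planet_positions : List (String × Int)) (target_planet : String) (out : List (String × List Int)) : Decidable (Spec_calculate_prastaraka planet_positions target_planet out) := by unfold Spec_calculate_prastaraka; infer_instance

-- ===== CLAIM (what is proved, stated in full; the proofs are below) =====
def Claim_equal_calculate_prastaraka : Prop := ∀ (planet_positions : List (String × Int)) (target_planet : String), Dom_calculate_prastaraka planet_positions target_planet → Spec_calculate_prastaraka planet_positions target_planet (calculate_prastaraka planet_positions target_planet)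

-- ===== LEMMAS AND PROOFS =====

lemma aFill_length (pos : Int) : ∀ (hs : List Int) (row : List Int),
    (aFill pos row hs).length = row.length := by
  intro hs
  induction hs with
  | nil => intro row; rfl
  | cons h t ih =>
    intro row
    simp only [aFill, List.foldl_cons] at *
    rw [ih]
    exact PySem.List.length_pySetD _ _ _

lemma aFill_get (pos : Int) : ∀ (hs row : List Int) (hlen : row.length = 12) (i : Nat)
    (hi : i < 12),
    (aFill pos row hs).getD i 0
      = if ∃ h ∈ hs, PySem.Int.mod (pos + (h - 1)) 12 = (i : Int) then 1
        else row.getD i 0 := by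
  intro hs
  induction hs with
  | nil => intro row hlen i hi; simp [aFill]
  | cons h t ih =>
    intro row hlen i hi
    have hnn : 0 ≤ PySem.Int.mod (pos + (h - 1)) 12 := PySem.Int.mod_nonneg _ (by norm_num)
    have hlt : PySem.Int.mod (pos + (h - 1)) 12 < 12 := PySem.Int.mod_lt _ (by norm_num)
    have hstep : aFill pos row (h :: t)
        = aFill pos (PySem.List.pySetD row (PySem.Int.mod (pos + (h - 1)) 12) 1) t := rfl
    rw [hstep, PySem.List.pySetD_of_nonneg row 1 hnn,
        ih _ (by simpa using hlen) i hi]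
    have hset : (row.set (PySem.Int.mod (pos + (h - 1)) 12).toNat 1).getD i 0
        = if (PySem.Int.mod (pos + (h - 1)) 12).toNat = i then 1 else row.getD i 0 := by
      rw [List.getD_eq_getElem _ _ (by simp [hlen]; omega),
          List.getD_eq_getElem _ _ (by omega), List.getElem_set]
    rw [hset]
    simp only [List.exists_mem_cons_iff]
    by_cases hc : ∃ x ∈ t, PySem.Int.mod (pos + (x - 1)) 12 = (i : Int)
    · rw [if_pos hc, if_pos (Or.inr hc)]
    · rw [if_neg hc]
      by_cases hh : PySem.Int.mod (pos + (h - 1)) 12 = (i : Int)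
      · have hti : (PySem.Int.mod (pos + (h - 1)) 12).toNat = i := by omega
        rw [if_pos hti, if_pos (Or.inl hh)]
      · have hti : (PySem.Int.mod (pos + (h - 1)) 12).toNat ≠ i := by omega
        rw [if_neg hti, if_neg (not_or.mpr ⟨hh, hc⟩)]

-- the scatter row equals the bit-extraction row, for houses in 1..12 whose mask bits agree
lemma row_eq_mask (pos m : Int) (v : List Int) (hb : ∀ h ∈ v, 1 ≤ h ∧ h ≤ 12)
    (hm : ∀ k : Nat, k < 12 →
        PySem.Int.mod (PySem.Int.floordiv m (2 ^ k)) 2 = if ((k : Int) + 1) ∈ v then 1 else 0) :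
    aFill pos (List.replicate 12 0) v
      = (PySem.List.pyRange 0 12 1).map
          (fun s => PySem.Int.mod (PySem.Int.floordiv m (2 ^ (PySem.Int.mod (s - pos) 12).toNat)) 2) := by
  have h12 : ∀ a : Int, PySem.Int.mod a 12 = a % 12 := fun a =>
    PySem.Int.mod_eq_emod_of_pos (by norm_num)
  apply List.ext_getElem
  · rw [aFill_length]
    simp [PySem.List.length_pyRange_one]
  · intro i hi1 hi2
    have hi : i < 12 := by
      rw [aFill_length] at hi1; simpa using hi1
    rw [← List.getD_eq_getElem _ 0 hi1,
        aFill_get pos v (List.replicate 12 0) (by simp) i hi]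
    rw [List.getElem_map, PySem.List.getElem_pyRange_one]
    have hknn : 0 ≤ PySem.Int.mod ((0 : Int) + (i : Int) - pos) 12 :=
      PySem.Int.mod_nonneg _ (by norm_num)
    have hklt : PySem.Int.mod ((0 : Int) + (i : Int) - pos) 12 < 12 :=
      PySem.Int.mod_lt _ (by norm_num)
    rw [hm (PySem.Int.mod ((0 : Int) + (i : Int) - pos) 12).toNat (by omega)]
    have htn : ((PySem.Int.mod ((0 : Int) + (i : Int) - pos) 12).toNat : Int)
        = PySem.Int.mod ((0 : Int) + (i : Int) - pos) 12 := Int.toNat_of_nonneg hknn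
    rw [htn]
    have hcond : (∃ h ∈ v, PySem.Int.mod (pos + (h - 1)) 12 = (i : Int))
        ↔ (PySem.Int.mod ((0 : Int) + (i : Int) - pos) 12 + 1) ∈ v := by
      constructor
      · rintro ⟨h, hmem, heq⟩
        have hbnd := hb h hmem
        rw [h12] at heq
        have hhe : h = PySem.Int.mod ((0 : Int) + (i : Int) - pos) 12 + 1 := by
          rw [h12]; omega
        rwa [← hhe]
      · intro hmem
        refine ⟨_, hmem, ?_⟩
        rw [h12, h12]
        omega
    by_cases hc : ∃ h ∈ v, PySem.Int.mod (pos + (h - 1)) 12 = (i : Int)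
    · rw [if_pos hc, if_pos (hcond.mp hc)]
    · rw [if_neg hc, if_neg (fun hmem => hc (hcond.mpr hmem))]
      interval_cases i <;> rfl

lemma aFold_getD_notmem (pp : List (String × Int)) :
    ∀ (rs : List (String × List Int)) (pr : PySem.Dict String (List Int)) (k : String),
    k ∉ rs.map (·.1) →
    (rs.foldl (aStep pp) pr).getD k (List.replicate 12 0) = pr.getD k (List.replicate 12 0) := by
  intro rs
  induction rs with
  | nil => intro pr k _; rfl
  | cons e t ih =>
    intro pr k hk
    simp only [List.map_cons, List.mem_cons] at hk
    push_neg at hk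
    rw [List.foldl_cons, ih _ _ hk.2]
    unfold aStep
    cases (PySem.Dict.mk pp).get? e.1 with
    | none => rfl
    | some pos => exact PySem.Dict.getD_insert_of_ne _ _ _ hk.1

lemma aFold_getD_mem (pp : List (String × Int)) :
    ∀ (rs : List (String × List Int)) (pr : PySem.Dict String (List Int)) (k : String) (v : List Int),
    (rs.map (·.1)).Nodup → (k, v) ∈ rs →
    (rs.foldl (aStep pp) pr).getD k (List.replicate 12 0)
      = match (PySem.Dict.mk pp).get? k with
        | some pos => aFill pos (pr.getD k (List.replicate 12 0)) v
        | none => pr.getD k (List.replicate 12 0) := by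
  intro rs
  induction rs with
  | nil => intro _ _ _ _ h; exact absurd h (List.not_mem_nil)
  | cons e t ih =>
    intro pr k v hnd hmem
    simp only [List.map_cons, List.nodup_cons] at hnd
    rcases List.mem_cons.mp hmem with heq | htl
    · -- e = (k, v); k not among tail keys
      have hk : k ∉ t.map (·.1) := by rw [← heq] at hnd; exact hnd.1
      rw [List.foldl_cons, aFold_getD_notmem pp t _ k hk]
      unfold aStep
      rw [← heq]
      cases (PySem.Dict.mk pp).get? k with
      | none => rfl
      | some pos => exact PySem.Dict.getD_insert_self _ _ _ _
    · -- k in tail, so e.1 ≠ k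
      have hk : k ∈ t.map (·.1) := List.mem_map.mpr ⟨(k, v), htl, rfl⟩
      have hne : e.1 ≠ k := fun h => hnd.1 (h ▸ hk)
      rw [List.foldl_cons]
      have hstep : (aStep pp pr e).getD k (List.replicate 12 0) = pr.getD k (List.replicate 12 0) := by
        unfold aStep
        cases (PySem.Dict.mk pp).get? e.1 with
        | none => rfl
        | some pos => exact PySem.Dict.getD_insert_of_ne _ _ _ (Ne.symm hne)
      rw [ih _ k v hnd.2 htl, hstep]

lemma aFold_keys (pp : List (String × Int)) :
    ∀ (rs : List (String × List Int)) (pr : PySem.Dict String (List Int)),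
    (∀ e ∈ rs, pr.contains e.1 = true) →
    (rs.foldl (aStep pp) pr).keys = pr.keys := by
  intro rs
  induction rs with
  | nil => intro _ _; rfl
  | cons e t ih =>
    intro pr hc
    have hkeys : (aStep pp pr e).keys = pr.keys := by
      unfold aStep
      cases (PySem.Dict.mk pp).get? e.1 with
      | none => rfl
      | some pos => exact PySem.Dict.keys_insert_of_contains _ _ (hc e List.mem_cons_self)
    rw [List.foldl_cons, ih _ ?_, hkeys]
    intro e' he'
    rw [PySem.Dict.contains_iff_mem_keys, hkeys, ← PySem.Dict.contains_iff_mem_keys]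
    exact hc e' (List.mem_cons_of_mem _ he')

lemma init_getD (k : String) :
    (aInitDonors DONORS).getD k (List.replicate 12 0) = List.replicate 12 0 := by
  have h : aInitDonors DONORS = PySem.Dict.mk
      [("Sun", List.replicate 12 0), ("Moon", List.replicate 12 0), ("Mars", List.replicate 12 0),
       ("Mercury", List.replicate 12 0), ("Jupiter", List.replicate 12 0), ("Venus", List.replicate 12 0),
       ("Saturn", List.replicate 12 0), ("Lagna", List.replicate 12 0)] := by decide
  rw [h, PySem.Dict.getD_eq_get?_getD]
  simp only [PySem.Dict.get?_mk_cons]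
  split_ifs <;> rfl

lemma main_eq (pp : List (String × Int)) (rules : PySem.Dict String (List Int))
    (masks : PySem.Dict String Int)
    (hk : rules.keys = DONORS)
    (hb : ∀ e ∈ rules.items, ∀ h ∈ e.2, 1 ≤ h ∧ h ≤ 12)
    (hmk : ∀ e ∈ rules.items, ∀ k : Nat, k < 12 →
        PySem.Int.mod (PySem.Int.floordiv (masks.getD e.1 0) (2 ^ k)) 2
          = if ((k : Int) + 1) ∈ e.2 then 1 else 0) :
    (rules.items.foldl (aStep pp) (aInitDonors DONORS)).items
      = DONORS.map (fun d => (d, bDonorRow masks pp d)) := by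
  have hndD : DONORS.Nodup := by decide
  have hnd : (rules.items.map (·.1)).Nodup := by
    have : rules.keys = rules.items.map (·.1) := rfl
    rw [← this, hk]; exact hndD
  have hkeysF : (rules.items.foldl (aStep pp) (aInitDonors DONORS)).keys = DONORS := by
    rw [aFold_keys pp rules.items _ ?_]
    · decide
    · intro e he
      have : e.1 ∈ rules.keys := by
        show e.1 ∈ rules.items.map (·.1)
        exact List.mem_map.mpr ⟨e, he, rfl⟩
      rw [hk] at this
      rw [PySem.Dict.contains_iff_mem_keys]
      show e.1 ∈ (aInitDonors DONORS).keys
      have : (aInitDonors DONORS).keys = DONORS := by decide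
      rw [this]; assumption
  have hndF : (rules.items.foldl (aStep pp) (aInitDonors DONORS)).keys.Nodup := by
    rw [hkeysF]; exact hndD
  rw [PySem.Dict.items_eq_map_keys _ hndF (List.replicate 12 0), hkeysF]
  apply List.map_congr_left
  intro d hd
  -- the value stored for donor d
  have hdk : d ∈ rules.keys := by rw [hk]; exact hd
  have hc : rules.contains d = true := (PySem.Dict.contains_iff_mem_keys _ _).mpr hdk
  obtain ⟨v, hv⟩ : ∃ v, rules.get? d = some v := by
    cases hq : rules.get? d with
    | none => rw [PySem.Dict.get?_eq_none_iff_contains] at hq; rw [hq] at hc; cases hc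
    | some v => exact ⟨v, rfl⟩
  have hmem : (d, v) ∈ rules.items := PySem.Dict.mem_items_of_get?_eq_some _ hv
  rw [aFold_getD_mem pp rules.items (aInitDonors DONORS) d v hnd hmem]
  unfold bDonorRow
  cases (PySem.Dict.mk pp).get? d with
  | none => exact congrArg (fun r => (d, r)) (init_getD d)
  | some pos =>
    rw [init_getD]
    exact congrArg (fun r => (d, r)) (row_eq_mask pos (masks.getD d 0) v (hb _ hmem) (hmk _ hmem))

-- ===== VERDICT (by name: the statement is the Claim_ definition above) =====
theorem calculate_prastaraka_spec : Claim_equal_calculate_prastaraka := by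
  intro pp target _
  unfold Spec_calculate_prastaraka calculate_prastaraka calculate_prastaraka_alt
  simp only [ASHTAKVARGA_TABLES, PRASTARAKA_MASKS, PySem.Dict.get?_mk_cons]
  split_ifs <;>
    first
      | rfl
      | (dsimp only; rw [if_neg (by decide)];
         exact main_eq pp _ _ (by decide) (by decide) (by decide))
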